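-- pv_equiv track=rewrite | github.com/Decent898/usb_monitor | src/core/usb_scanner.py | _parse_wmic_output
-- ===== SOURCE A (Python) =====
-- from typing import List, Dict, Optional
--
-- def _parse_wmic_output(output: str, required_cols: List[str]) -> List[Dict[str, str]]:
--     """
--     通用解析 WMIC CSV 输出的方法
--     自动根据表头识别列索引，解决列顺序不一致的问题
--     """
--     results = []
--     # 过滤掉空行
--     lines = [line.strip() for line in output.strip().split('\n') if line.strip()]
--
--     if len(lines) < 2:
--         return results
--
--     # 1. 解析表头，建立 {列名: 索引} 映射
--     header = lines[0].split(',')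
--     # 去除表头可能存在的 BOM 或空白
--     header = [h.strip() for h in header]
--
--     col_indices = {}
--     for col in required_cols:
--         try:
--             # 查找列名位置
--             idx = header.index(col)
--             col_indices[col] = idx
--         except ValueError:
--             # 某些列可能不存在
--             col_indices[col] = -1
--
--     # 2. 解析数据行
--     for line in lines[1:]:
--         parts = line.split(',')
--
--         # 确保行长度足够
--         if not parts:
--             continue
--
--         row_data = {}
--         for col, idx in col_indices.items():
--             if idx != -1 and idx < len(parts):
--                 row_data[col] = parts[idx].strip()
--             else:
--                 row_data[col] = ''
--         results.append(row_data)
--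
--     return results
-- ===== SOURCE B (Python) =====
-- from typing import List, Dict
--
-- def _parse_wmic_output(output: str, required_cols: List[str]) -> List[Dict[str, str]]:
--     lines = [ln.strip() for ln in output.strip().split('\n') if ln.strip()]
--     if len(lines) < 2:
--         return []
--     header = [h.strip() for h in lines[0].split(',')]
--     results = []
--     for line in lines[1:]:
--         parts = line.split(',')
--         # per-row header->value map; first occurrence wins (matching header.index)
--         row = {}
--         for h, v in zip(header, parts):
--             if h not in row:
--                 row[h] = v
--         results.append({col: row.get(col, '').strip() for col in required_cols})
--     return results
-- ===== Notes on version B (the rewrite author's own statement) =====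
-- stated objective: idiomatic
-- what changed: Drops the precomputed {column: index} table; instead each data row is zipped with the header into a first-occurrence-wins dict and the result row is a comprehension over required_cols with a '' default.
import Mathlib
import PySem

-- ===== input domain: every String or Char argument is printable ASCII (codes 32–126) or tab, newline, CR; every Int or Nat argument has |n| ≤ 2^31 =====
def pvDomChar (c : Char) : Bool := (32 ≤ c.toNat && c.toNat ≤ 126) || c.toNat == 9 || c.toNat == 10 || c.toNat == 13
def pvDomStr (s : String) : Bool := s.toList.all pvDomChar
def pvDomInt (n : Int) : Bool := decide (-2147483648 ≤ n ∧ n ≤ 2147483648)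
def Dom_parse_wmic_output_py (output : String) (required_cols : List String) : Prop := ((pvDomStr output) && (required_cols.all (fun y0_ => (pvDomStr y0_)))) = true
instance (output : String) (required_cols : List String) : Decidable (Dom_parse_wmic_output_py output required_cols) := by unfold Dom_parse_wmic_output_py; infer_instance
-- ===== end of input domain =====

-- B replaces A's precomputed {column: index} table by a per-row first-occurrence-wins
-- zip of header with the row (idiomatic; same cost).

-- ===== PORT A =====
-- s.split(sep) for a nonempty separator (total; split? is none only for sep = "")
def pvSplit (s sep : String) : List String := (PySem.Str.split? s sep).getD []

-- header.index(col) caught to -1, as in A's try/except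
def pvIndexOr (header : List String) (col : String) : Int :=
  match PySem.List.index? header col with
  | some i => (i : Int)
  | none => -1

def parse_wmic_output_py (output : String) (required_cols : List String) : List (List (String × String)) :=
  let lines := ((pvSplit (PySem.Str.strip output) "\n").map PySem.Str.strip).filter (fun l => l ≠ "")
  match lines with
  | l0 :: l1 :: restLines =>
    let header := (pvSplit l0 ",").map PySem.Str.strip
    let col_indices : PySem.Dict String Int :=
      required_cols.foldl (fun d col => d.insert col (pvIndexOr header col)) PySem.Dict.empty
    (l1 :: restLines).foldl (fun results line =>
      let parts := pvSplit line ","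
      if parts = [] then results
      else
        let row_data : PySem.Dict String String :=
          col_indices.items.foldl (fun d p =>
            d.insert p.1 (if p.2 ≠ -1 ∧ p.2 < (parts.length : Int)
                          then PySem.Str.strip ((PySem.List.pyGet? parts p.2).getD "")
                          else "")) PySem.Dict.empty
        results ++ [row_data.items]) []
  | _ => []

-- ===== PORT B =====
def pvSplitB (s sep : String) : List String := (PySem.Str.split? s sep).getD []

def parse_wmic_output_py_alt (output : String) (required_cols : List String) : List (List (String × String)) :=
  let lines := ((pvSplitB (PySem.Str.strip output) "\n").map PySem.Str.strip).filter (fun l => l ≠ "")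
  match lines with
  | [] => []
  | [_] => []
  | l0 :: rest =>
    let header := (pvSplitB l0 ",").map PySem.Str.strip
    rest.foldl (fun results line =>
      let parts := pvSplitB line ","
      let row : PySem.Dict String String :=
        (header.zip parts).foldl (fun d p => if d.contains p.1 then d else d.insert p.1 p.2)
          PySem.Dict.empty
      results ++ [(required_cols.foldl (fun d col =>
        d.insert col (PySem.Str.strip (row.getD col ""))) PySem.Dict.empty).items]) []

-- ===== PRECONDITION & SPEC =====
def Spec_parse_wmic_output_py (output : String) (required_cols : List String) (out : List (List (String × String))) : Prop := out = parse_wmic_output_py_alt output required_cols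
instance (output : String) (required_cols : List String) (out : List (List (String × String))) : Decidable (Spec_parse_wmic_output_py output required_cols out) := by unfold Spec_parse_wmic_output_py; infer_instance

-- ===== CLAIM (what is proved, stated in full; the proofs are below) =====
def Claim_equal_parse_wmic_output_py : Prop := ∀ (output : String) (required_cols : List String), Dom_parse_wmic_output_py output required_cols → Spec_parse_wmic_output_py output required_cols (parse_wmic_output_py output required_cols)

-- ===== LEMMAS AND PROOFS =====

-- a Python str.split(sep) with nonempty sep never returns the empty list
lemma splitOn_go_ne_nil (sep : List Char) : ∀ (fuel : Nat) (l cur : List Char) (acc : List (List Char)),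
    PySem.Chars.splitOn.go sep fuel l cur acc ≠ [] := by
  intro fuel
  induction fuel with
  | zero => intro l cur acc; simp [PySem.Chars.splitOn.go]
  | succ n ih =>
    intro l cur acc
    cases l with
    | nil => simp [PySem.Chars.splitOn.go]
    | cons c rest =>
      rw [PySem.Chars.splitOn.go]
      split_ifs <;> apply ih

lemma pvSplit_comma_ne_nil (s : String) : pvSplit s "," ≠ [] := by
  simp [pvSplit, PySem.Str.split?, PySem.Chars.split?, PySem.Chars.splitOn]
  exact splitOn_go_ne_nil _ _ _ _ _

-- lookup in a dict built by inserting (c, f c) over a list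
lemma getD_foldl_insert_fn {ν : Type} (l : List String) (f : String → ν) (d : PySem.Dict String ν)
    (k : String) (v0 : ν) :
    (l.foldl (fun d c => d.insert c (f c)) d).getD k v0 = if k ∈ l then f k else d.getD k v0 := by
  induction l generalizing d with
  | nil => simp
  | cons c cs ih =>
    simp only [List.foldl_cons, ih, PySem.Dict.getD_insert, List.mem_cons]
    by_cases h1 : k ∈ cs <;> by_cases h2 : k = c <;> simp [h1, h2]

-- items of such a dict: ordered dedup of the key list, paired with f
lemma items_foldl_insert_fn {ν : Type} (l : List String) (f : String → ν) (v0 : ν) :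
    (l.foldl (fun d c => d.insert c (f c)) (PySem.Dict.empty : PySem.Dict String ν)).items
      = (PySem.Set.update ([] : List String) l).map (fun c => (c, f c)) := by
  have hk : (l.foldl (fun d c => d.insert c (f c)) (PySem.Dict.empty : PySem.Dict String ν)).keys
      = PySem.Set.update ([] : List String) l := by
    have := PySem.Dict.keys_foldl_insert l (fun _ c => f c) (PySem.Dict.empty : PySem.Dict String ν)
    simpa [PySem.Dict.empty, PySem.Dict.keys_mk] using this
  have hnd : (l.foldl (fun d c => d.insert c (f c)) (PySem.Dict.empty : PySem.Dict String ν)).keys.Nodup := by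
    exact PySem.Dict.nodup_keys_foldl_insert l (fun _ c => f c) _ (by simp [PySem.Dict.empty, PySem.Dict.keys_mk])
  rw [PySem.Dict.items_eq_map_keys _ hnd v0, hk]
  apply List.map_congr_left
  intro c hc
  have hcl : c ∈ l := by simpa [pysem] using hc
  simp [getD_foldl_insert_fn, hcl]

-- lookup in B's first-occurrence-wins zip dict
lemma get?_zip_fold (l : List (String × String)) (d : PySem.Dict String String) (k : String) :
    (l.foldl (fun d p => if d.contains p.1 then d else d.insert p.1 p.2) d).get? k
      = (d.get? k).or ((l.find? (fun p => p.1 == k)).map Prod.snd) := by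
  induction l generalizing d with
  | nil => simp
  | cons p ps ih =>
    simp only [List.foldl_cons]
    cases hc : d.contains p.1 with
    | true =>
      rw [if_pos rfl, ih]
      by_cases hk : p.1 = k
      · obtain ⟨v, hv⟩ : ∃ v, d.get? k = some v := by
          rw [← Option.isSome_iff_exists, ← PySem.Dict.contains_eq_isSome_get?, ← hk, hc]
        simp [hv]
      · simp [hk]
    | false =>
      rw [if_neg (by simp), ih]
      have hdk : d.get? p.1 = none := by
        have h := (PySem.Dict.contains_eq_isSome_get? d p.1).symm.trans hc
        simpa using h
      by_cases hk : p.1 = k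
      · subst hk
        simp [PySem.Dict.get?_insert_self, hdk]
      · rw [PySem.Dict.get?_insert_of_ne _ _ (fun h => hk h.symm)]
        simp [hk]

-- first match in zip header parts = value at header.index, if that index is short enough
lemma zip_find?_eq_index? (header parts : List String) (k : String) :
    ((header.zip parts).find? (fun p => p.1 == k)).map Prod.snd
      = (PySem.List.index? header k).bind (fun i => parts[i]?) := by
  induction header generalizing parts with
  | nil => simp [PySem.List.index?]
  | cons h hs ih =>
    cases parts with
    | nil =>
      simp only [List.zip_nil_right, List.find?_nil, Option.map_none]
      cases hi : PySem.List.index? (h :: hs) k <;> simp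
    | cons v vs =>
      by_cases hk : h = k
      · subst hk
        simp [PySem.List.index?, List.idxOf?_cons]
      · have hbk : (h == k) = false := beq_eq_false_iff_ne.mpr hk
        have ih' := ih vs
        simp only [PySem.List.index?] at ih' ⊢
        simp only [List.zip_cons_cons, List.find?_cons, hbk, List.idxOf?_cons]
        rw [ih']
        cases hio : List.idxOf? k hs with
        | none => simp
        | some i => simp [List.getElem?_cons_succ]

-- per-column value: A's index computation agrees with B's row.get(col, '').strip()
lemma rowval_eq (header parts : List String) (col : String) :
    (if pvIndexOr header col ≠ -1 ∧ pvIndexOr header col < (parts.length : Int)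
     then PySem.Str.strip ((PySem.List.pyGet? parts (pvIndexOr header col)).getD "")
     else "")
    = PySem.Str.strip
        (((header.zip parts).foldl (fun d p => if d.contains p.1 then d else d.insert p.1 p.2)
            (PySem.Dict.empty : PySem.Dict String String)).getD col "") := by
  have hstrip : PySem.Str.strip "" = "" := by decide
  have hgetD : ∀ (d : PySem.Dict String String), d.getD col "" = (d.get? col).getD "" := by
    intro d; rfl
  rw [hgetD, get?_zip_fold, zip_find?_eq_index?]
  cases hi : PySem.List.index? header col with
  | none =>
    have hi' : List.idxOf? col header = none := hi
    have hpv : pvIndexOr header col = -1 := by simp [pvIndexOr, hi']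
    rw [hpv]
    simp [hstrip]
  | some i =>
    have hi' : List.idxOf? col header = some i := hi
    have hpv : pvIndexOr header col = (i : Int) := by simp [pvIndexOr, hi']
    rw [hpv]
    simp only [Option.bind_some]
    by_cases hlt : i < parts.length
    · have hne : ((i : Int) ≠ -1 ∧ (i : Int) < (parts.length : Int)) := by
        constructor
        · omega
        · exact_mod_cast hlt
      rw [if_pos hne]
      have hpg : PySem.List.pyGet? parts (i : Int) = parts[i]? := by
        simp [pysem]
      rw [hpg]
      rfl
    · have hnone : parts[i]? = none := by
        apply List.getElem?_eq_none
        omega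
      rw [hnone, if_neg]
      · simp [hstrip]
      · rintro ⟨-, h2⟩
        have : (parts.length : Int) ≤ (i : Int) := by exact_mod_cast Nat.le_of_not_lt hlt
        omega

-- the whole row: A's items = B's items
lemma row_items_eq (header parts : List String) (required_cols : List String) :
    ((required_cols.foldl (fun d col => d.insert col (pvIndexOr header col))
        (PySem.Dict.empty : PySem.Dict String Int)).items.foldl (fun d p =>
          d.insert p.1 (if p.2 ≠ -1 ∧ p.2 < (parts.length : Int)
                        then PySem.Str.strip ((PySem.List.pyGet? parts p.2).getD "")
                        else "")) (PySem.Dict.empty : PySem.Dict String String)).items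
    = (required_cols.foldl (fun d col =>
        d.insert col (PySem.Str.strip
          (((header.zip parts).foldl (fun d p => if d.contains p.1 then d else d.insert p.1 p.2)
              (PySem.Dict.empty : PySem.Dict String String)).getD col "")))
        (PySem.Dict.empty : PySem.Dict String String)).items := by
  have hA := items_foldl_insert_fn required_cols (fun c => pvIndexOr header c) (0 : Int)
  have hBrow := items_foldl_insert_fn required_cols
    (fun c => PySem.Str.strip
      (((header.zip parts).foldl (fun d p => if d.contains p.1 then d else d.insert p.1 p.2)
          (PySem.Dict.empty : PySem.Dict String String)).getD c "")) ""
  rw [hBrow, hA]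
  rw [PySem.Dict.items_foldl_insert_fresh _ Prod.fst
    (fun p => (if p.2 ≠ -1 ∧ p.2 < (parts.length : Int)
               then PySem.Str.strip ((PySem.List.pyGet? parts p.2).getD "")
               else "")) PySem.Dict.empty (by intro a _; rfl)
    (by
      rw [List.map_map]
      simp only [Function.comp_def]
      have : ((PySem.Set.update ([] : List String) required_cols).map
          (fun c => ((c, pvIndexOr header c) : String × Int).1)) = PySem.Set.update ([] : List String) required_cols := by
        simp
      rw [this]
      exact PySem.Set.nodup_update ([] : List String) _ (by simp))]
  simp only [PySem.Dict.empty, List.nil_append, List.map_map, Function.comp_def]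
  apply List.map_congr_left
  intro c _
  exact congrArg (fun v => (c, v)) (rowval_eq header parts c)

-- ===== VERDICT (by name: the statement is the Claim_ definition above) =====
theorem parse_wmic_output_py_spec : Claim_equal_parse_wmic_output_py := by
  intro output required_cols _
  unfold Spec_parse_wmic_output_py parse_wmic_output_py parse_wmic_output_py_alt
  rw [show pvSplitB = pvSplit from rfl]
  generalize ((pvSplit (PySem.Str.strip output) "\n").map PySem.Str.strip).filter (fun l => l ≠ "") = lines
  cases lines with
  | nil => rfl
  | cons l0 rest =>
    cases rest with
    | nil => rfl
    | cons l1 restLines =>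
      simp only
      congr 1
      funext results line
      rw [if_neg (pvSplit_comma_ne_nil line)]
      exact congrArg (fun r => results ++ [r]) (row_items_eq _ _ _)
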